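-- pv_equiv track=rewrite | github.com/ravikanthamajala/RAG_FRAMEWORK_2 | backend/app/agents/rag_agent.py | prioritize_documents
-- ===== SOURCE A (Python) =====
-- from typing import Dict, Any, List, Optional
--
-- _INTENTS = {
--     "COMPARISON": {
--         "keywords": [
--             "compare", "comparison", "vs", "versus", "with and without",
--             "difference between", "impact of", "effect of", "with infrastructure",
--             "without infrastructure", "with port", "without port", "if i construct",
--             "if i don't construct", "scenario", "baseline",
--             "with highway", "without highway", "highway construction", "highways construction",
--             "new highway", "new highways", "road construction", "new roads",
--         ],
--         "doc_keywords": ["infrastructure", "port", "highway", "scenario", "policy", "comparison"],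
--     },
--     "FORECAST": {
--         "keywords": [
--             "forecast", "predict", "prediction", "future", "by 2030", "by 2035",
--             "by 2040", "projection", "outlook", "trajectory", "what will", "how will",
--             "will be", "expected", "anticipate", "estimate",
--         ],
--         "doc_keywords": ["forecast", "projection", "trend", "2030", "2035", "2040"],
--     },
--     "TREND": {
--         "keywords": [
--             "trend", "growth", "change over", "evolution", "over the years",
--             "historically", "pattern", "trajectory",
--         ],
--         "doc_keywords": ["trend", "growth", "historical", "annual"],
--     },
--     "NUMBERS": {
--         "keywords": [
--             "how much", "how many", "percentage", "rate", "value", "price",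
--             "sales", "revenue", "cost", "profit", "quantity", "units",
--             "market size", "share", "billion", "million", "crore",
--         ],
--         "doc_keywords": [],  # rely on similarity search
--     },
--     "DISTRIBUTION": {
--         "keywords": [
--             "market share", "distribution", "breakdown", "proportion",
--             "oem", "manufacturers", "who leads", "dominant",
--         ],
--         "doc_keywords": ["market share", "oem", "distribution"],
--     },
-- }
--
-- def prioritize_documents(docs: List[Dict], intent: str) -> List[Dict]:
--     """Push documents most relevant to the detected intent to the top."""
--     doc_kws = _INTENTS.get(intent, {}).get("doc_keywords", [])
--     if not doc_kws:
--         return docs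
--
--     def _score(doc):
--         name = doc.get("filename", "").lower()
--         return sum(1 for kw in doc_kws if kw in name)
--
--     # Stable sort: high-score docs first, others keep similarity order
--     prioritised = sorted(docs, key=_score, reverse=True)
--     return prioritised
-- ===== SOURCE B (Python) =====
-- from typing import Dict, Any, List, Optional
--
-- # Only the doc_keywords of each intent matter to this function; the per-intent
-- # "keywords" lists and the nested-dict lookup are irrelevant to its result.
-- _DOC_KEYWORDS = {
--     "COMPARISON": ["infrastructure", "port", "highway", "scenario", "policy", "comparison"],
--     "FORECAST": ["forecast", "projection", "trend", "2030", "2035", "2040"],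
--     "TREND": ["trend", "growth", "historical", "annual"],
--     "NUMBERS": [],
--     "DISTRIBUTION": ["market share", "oem", "distribution"],
-- }
--
-- def prioritize_documents(docs: List[Dict], intent: str) -> List[Dict]:
--     """Counting sort: drop each doc into the bucket of its keyword-match score,
--     then concatenate the buckets from the highest score down to zero."""
--     kws = _DOC_KEYWORDS.get(intent, [])
--     if not kws:
--         return docs
--
--     buckets = [[] for _ in range(len(kws) + 1)]
--     for doc in docs:
--         name = doc.get("filename", "").lower()
--         score = len([kw for kw in kws if kw in name])
--         buckets[score].append(doc)
--
--     out = []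
--     for bucket in reversed(buckets):
--         out.extend(bucket)
--     return out
-- ===== Notes on version B (the rewrite author's own statement) =====
-- stated objective: alternative
-- what changed: Replaces the stable reverse comparison sort with a one-pass counting sort: B keeps its own intent->doc_keywords table (the nested dict and the unused 'keywords' lists are dropped), drops each document into a score-indexed bucket in input order, and concatenates the buckets from the highest score down to 0, reproducing the stable descending order without sorting.
import Mathlib
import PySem

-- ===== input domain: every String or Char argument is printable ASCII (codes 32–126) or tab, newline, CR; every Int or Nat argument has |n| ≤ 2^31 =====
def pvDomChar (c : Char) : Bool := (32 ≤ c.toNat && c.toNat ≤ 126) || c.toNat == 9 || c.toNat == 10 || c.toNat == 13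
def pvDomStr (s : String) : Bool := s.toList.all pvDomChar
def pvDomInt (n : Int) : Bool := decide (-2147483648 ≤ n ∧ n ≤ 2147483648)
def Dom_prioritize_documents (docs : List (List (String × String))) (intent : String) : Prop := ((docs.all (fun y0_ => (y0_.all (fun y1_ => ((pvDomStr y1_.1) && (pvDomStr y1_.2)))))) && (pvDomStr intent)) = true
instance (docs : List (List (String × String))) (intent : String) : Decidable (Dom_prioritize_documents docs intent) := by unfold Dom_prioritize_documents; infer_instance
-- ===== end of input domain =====

-- B replaces A's stable reverse comparison sort by a counting sort over score buckets
-- (own intent->doc_keywords table, one placement pass, buckets concatenated high to low);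
-- objective: alternative algorithm, same return value on every input.

-- ===== PORT A =====
-- `_INTENTS` module constant of A (dict of dicts; the "keywords" lists are part of A's table).
def pvINTENTS : PySem.Dict String (PySem.Dict String (List String)) :=
  PySem.Dict.mk [
    ("COMPARISON", PySem.Dict.mk [
      ("keywords", ["compare", "comparison", "vs", "versus", "with and without",
        "difference between", "impact of", "effect of", "with infrastructure",
        "without infrastructure", "with port", "without port", "if i construct",
        "if i don't construct", "scenario", "baseline",
        "with highway", "without highway", "highway construction", "highways construction",
        "new highway", "new highways", "road construction", "new roads"]),
      ("doc_keywords", ["infrastructure", "port", "highway", "scenario", "policy", "comparison"])]),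
    ("FORECAST", PySem.Dict.mk [
      ("keywords", ["forecast", "predict", "prediction", "future", "by 2030", "by 2035",
        "by 2040", "projection", "outlook", "trajectory", "what will", "how will",
        "will be", "expected", "anticipate", "estimate"]),
      ("doc_keywords", ["forecast", "projection", "trend", "2030", "2035", "2040"])]),
    ("TREND", PySem.Dict.mk [
      ("keywords", ["trend", "growth", "change over", "evolution", "over the years",
        "historically", "pattern", "trajectory"]),
      ("doc_keywords", ["trend", "growth", "historical", "annual"])]),
    ("NUMBERS", PySem.Dict.mk [
      ("keywords", ["how much", "how many", "percentage", "rate", "value", "price",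
        "sales", "revenue", "cost", "profit", "quantity", "units",
        "market size", "share", "billion", "million", "crore"]),
      ("doc_keywords", [])]),
    ("DISTRIBUTION", PySem.Dict.mk [
      ("keywords", ["market share", "distribution", "breakdown", "proportion",
        "oem", "manufacturers", "who leads", "dominant"]),
      ("doc_keywords", ["market share", "oem", "distribution"])])]

-- A's `doc_kws = _INTENTS.get(intent, {}).get("doc_keywords", [])`
def pvDocKws (intent : String) : List String :=
  PySem.Dict.getD (PySem.Dict.getD pvINTENTS intent PySem.Dict.empty) "doc_keywords" []

-- A's local `_score(doc)`: name = doc.get("filename","").lower(); sum(1 for kw in doc_kws if kw in name)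
def pvScore (doc_kws : List String) (doc : List (String × String)) : Int :=
  let name := PySem.Str.lower (PySem.Dict.getD (PySem.Dict.mk doc) "filename" "")
  ((doc_kws.map (fun kw => if PySem.Str.isIn kw name = true then (1 : Int) else 0)).sum)

def prioritize_documents (docs : List (List (String × String))) (intent : String) : List (List (String × String)) :=
  let doc_kws := pvDocKws intent
  if doc_kws = [] then docs
  else PySem.List.sorted docs (fun doc => pvScore doc_kws doc) true

-- ===== PORT B =====
-- B's `_DOC_KEYWORDS` module constant (flat dict: intent -> doc_keywords).
def pvDocKeywords : PySem.Dict String (List String) :=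
  PySem.Dict.mk [
    ("COMPARISON", ["infrastructure", "port", "highway", "scenario", "policy", "comparison"]),
    ("FORECAST", ["forecast", "projection", "trend", "2030", "2035", "2040"]),
    ("TREND", ["trend", "growth", "historical", "annual"]),
    ("NUMBERS", []),
    ("DISTRIBUTION", ["market share", "oem", "distribution"])]

-- B's score: len([kw for kw in kws if kw in name])
def pvScoreB (kws : List String) (doc : List (String × String)) : Nat :=
  (kws.filter (fun kw =>
      PySem.Str.isIn kw (PySem.Str.lower (PySem.Dict.getD (PySem.Dict.mk doc) "filename" "")))).length

def prioritize_documents_alt (docs : List (List (String × String))) (intent : String) : List (List (String × String)) :=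
  let kws := PySem.Dict.getD pvDocKeywords intent []
  if kws = [] then docs
  else
    -- buckets = [[] for _ in range(len(kws)+1)]; for doc in docs: buckets[score].append(doc)
    -- (the index `score` is always in range: 0 ≤ score ≤ len(kws))
    let buckets := docs.foldl
      (fun bs doc => bs.set (pvScoreB kws doc) (bs.getD (pvScoreB kws doc) [] ++ [doc]))
      (List.replicate (kws.length + 1) [])
    -- out = []; for bucket in reversed(buckets): out.extend(bucket)
    buckets.reverse.foldl (fun out bucket => out ++ bucket) []

-- ===== PRECONDITION & SPEC =====
def Spec_prioritize_documents (docs : List (List (String × String))) (intent : String) (out : List (List (String × String))) : Prop := out = prioritize_documents_alt docs intent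
instance (docs : List (List (String × String))) (intent : String) (out : List (List (String × String))) : Decidable (Spec_prioritize_documents docs intent out) := by unfold Spec_prioritize_documents; infer_instance

-- ===== CLAIM (what is proved, stated in full; the proofs are below) =====
def Claim_equal_prioritize_documents : Prop := ∀ (docs : List (List (String × String))) (intent : String), Dom_prioritize_documents docs intent → Spec_prioritize_documents docs intent (prioritize_documents docs intent)

-- ===== LEMMAS AND PROOFS =====

-- the two keyword lookups agree on every intent string
lemma pvKws_eq (intent : String) : pvDocKws intent = PySem.Dict.getD pvDocKeywords intent [] := by
  unfold pvDocKws pvDocKeywords pvINTENTS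
  by_cases h1 : ("COMPARISON" == intent) <;>
  by_cases h2 : ("FORECAST" == intent) <;>
  by_cases h3 : ("TREND" == intent) <;>
  by_cases h4 : ("NUMBERS" == intent) <;>
  by_cases h5 : ("DISTRIBUTION" == intent) <;>
    simp_all [PySem.Dict.getD, PySem.Dict.empty, PySem.Dict.get?]

-- A's Int score is B's Nat score
lemma pvScore_eq (kws : List String) (doc : List (String × String)) :
    pvScore kws doc = (pvScoreB kws doc : Int) := by
  unfold pvScore pvScoreB
  rw [PySem.List.sum_map_ite_one_zero]
  simp [List.countP_eq_length_filter]

-- the descending score list [n, n-1, …, 0]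
def pvDs (n : Nat) : List Int := (List.range (n+1)).map (fun k : Nat => (n : Int) - (k : Int))

lemma pvDs_zero : pvDs 0 = [0] := by decide

lemma pvDs_succ (n : Nat) : pvDs (n+1) = ((n : Int) + 1) :: pvDs n := by
  unfold pvDs
  rw [show n+1+1 = (n+1)+1 from rfl, List.range_succ_eq_map, List.map_cons, List.map_map]
  refine List.cons_eq_cons.mpr ⟨by push_cast; ring, ?_⟩
  apply List.map_congr_left
  intro k _
  simp only [Function.comp_apply]
  push_cast; ring

lemma pvMem_Ds {n : Nat} {s : Int} (h : s ∈ pvDs n) : 0 ≤ s ∧ s ≤ n := by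
  simp only [pvDs, List.mem_map] at h
  obtain ⟨k, hk, rfl⟩ := h
  have := List.mem_range.mp hk
  omega

lemma pvInsertBy_append {α : Type} (before : α → α → Bool) (x : α) (as bs : List α)
    (h : ∀ y ∈ as, before x y = false) :
    PySem.List.insertBy before x (as ++ bs) = as ++ PySem.List.insertBy before x bs := by
  induction as with
  | nil => simp
  | cons a t ih =>
    have ha : before x a = false := h a (by simp)
    simp only [List.cons_append, PySem.List.insertBy, ha]
    rw [ih (fun y hy => h y (by simp [hy]))]
    simp

lemma pvInsertBy_all_before {α : Type} (before : α → α → Bool) (x : α) (l : List α)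
    (h : ∀ y ∈ l, before x y = true) :
    PySem.List.insertBy before x l = x :: l := by
  cases l with
  | nil => rfl
  | cons a t => simp [PySem.List.insertBy, h a (by simp)]

lemma pvFlatMap_congr {α β : Type} {l : List α} {f g : α → List β}
    (h : ∀ s ∈ l, f s = g s) : l.flatMap f = l.flatMap g := by
  induction l with
  | nil => rfl
  | cons a t ih => simp [List.flatMap_cons, h a (by simp), ih fun s hs => h s (by simp [hs])]

-- inserting x into the concatenation of score groups puts it at the end of its own group
lemma pvInsert_buckets {α : Type} (sc : α → Int) (x : α) (n : Nat)
    (hx0 : 0 ≤ sc x) (hxn : sc x ≤ (n : Int)) (F : Int → List α)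
    (hF : ∀ s, ∀ d ∈ F s, sc d = s) :
    PySem.List.insertBy (fun a b => decide (sc b < sc a)) x ((pvDs n).flatMap F)
      = (pvDs n).flatMap (fun s => F s ++ if sc x == s then [x] else []) := by
  induction n with
  | zero =>
    have hx : sc x = 0 := le_antisymm (by exact_mod_cast hxn) hx0
    rw [pvDs_zero]
    simp only [List.flatMap_cons, List.flatMap_nil, List.append_nil]
    rw [PySem.List.insertBy_of_forall_not_before]
    · simp [hx]
    · intro y hy
      have := hF 0 y hy
      simp [this, hx]
  | succ m ih =>
    rw [pvDs_succ]
    simp only [List.flatMap_cons]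
    rw [pvInsertBy_append]
    · by_cases hx : sc x = (m : Int) + 1
      · rw [pvInsertBy_all_before]
        · have h1 : (sc x == (m : Int) + 1) = true := by simp [hx]
          have h2 : (pvDs m).flatMap (fun s => F s ++ if sc x == s then [x] else [])
              = (pvDs m).flatMap F := by
            apply pvFlatMap_congr
            intro s hs
            have := pvMem_Ds hs
            have : (sc x == s) = false := by simp; omega
            simp [this]
          rw [h2, h1]
          simp
        · intro y hy
          simp only [List.mem_flatMap] at hy
          obtain ⟨s, hs, hys⟩ := hy
          have h1 := pvMem_Ds hs
          have h2 := hF s y hys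
          simp [h2, hx]; omega
      · have hxm : sc x ≤ (m : Int) := by omega
        rw [ih hxm]
        have h1 : (sc x == (m : Int) + 1) = false := by simp [hx]
        rw [h1]
        simp
    · intro y hy
      have := hF ((m : Int) + 1) y hy
      simp [this]; omega

-- the insertion-sort fold over xs builds exactly the concatenation of the score groups
lemma pvFoldl_insert_eq_buckets {α : Type} (sc : α → Int) (n : Nat) (xs : List α)
    (h : ∀ d ∈ xs, 0 ≤ sc d ∧ sc d ≤ (n : Int)) :
    List.foldl (fun acc x => PySem.List.insertBy (fun a b => decide (sc b < sc a)) x acc) [] xs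
      = (pvDs n).flatMap (fun s => xs.filter (fun d => sc d == s)) := by
  induction xs using List.reverseRecOn with
  | nil => simp
  | append_singleton ys x ih =>
    rw [List.foldl_append]
    simp only [List.foldl_cons, List.foldl_nil]
    rw [ih (fun d hd => h d (by simp [hd]))]
    rw [pvInsert_buckets sc x n (h x (by simp)).1 (h x (by simp)).2
        (fun s => ys.filter (fun d => sc d == s))
        (fun s d hd => by
          have := List.of_mem_filter hd
          exact_mod_cast (by simpa using this))]
    apply pvFlatMap_congr
    intro s _
    by_cases hxs : sc x = s
    · simp [List.filter_append, List.filter, hxs]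
    · have hb : (sc x == s) = false := beq_eq_false_iff_ne.mpr hxs
      simp [List.filter_append, List.filter, hb]

lemma pvScore_bounds (doc_kws : List String) (doc : List (String × String)) :
    0 ≤ pvScore doc_kws doc ∧ pvScore doc_kws doc ≤ (doc_kws.length : Int) := by
  unfold pvScore
  rw [PySem.List.sum_map_ite_one_zero]
  constructor
  · positivity
  · exact_mod_cast List.countP_le_length

-- B's bucket-filling fold produces exactly the list of score groups, in score order
lemma pvBuckets_eq {α : Type} (sc : α → Nat) (n : Nat) (xs : List α)
    (h : ∀ d ∈ xs, sc d ≤ n) :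
    xs.foldl (fun bs d => bs.set (sc d) (bs.getD (sc d) [] ++ [d]))
        (List.replicate (n+1) ([] : List α))
      = (List.range (n+1)).map (fun i => xs.filter (fun d => sc d == i)) := by
  induction xs using List.reverseRecOn with
  | nil =>
    simp only [List.foldl_nil]
    apply List.ext_getElem
    · simp
    · intro i h1 h2
      simp
  | append_singleton ys x ih =>
    rw [List.foldl_append]
    simp only [List.foldl_cons, List.foldl_nil]
    rw [ih (fun d hd => h d (by simp [hd]))]
    have hs : sc x ≤ n := h x (by simp)
    apply List.ext_getElem
    · simp
    · intro i h1 h2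
      simp only [List.length_set, List.length_map, List.length_range] at h1 h2
      by_cases hi : i = sc x
      · subst hi
        rw [List.getElem_set_self (by simpa using h1)]
        rw [List.getElem_map, List.getElem_range]
        rw [List.getD_eq_getElem _ _ (by simpa)]
        simp [List.filter_append]
      · rw [List.getElem_set_ne (by omega)]
        rw [List.getElem_map, List.getElem_range, List.getElem_map, List.getElem_range]
        have hne : (sc x == i) = false := by simp; omega
        simp [List.filter_append, hne]

-- the reversed range [n, …, 0]
lemma pvRange_reverse (n : Nat) :
    (List.range (n+1)).reverse = (List.range (n+1)).map (fun k => n - k) := by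
  apply List.ext_getElem
  · simp
  · intro i h1 h2
    simp only [List.getElem_reverse, List.getElem_map, List.getElem_range,
      List.length_range] at *
    omega

-- ===== VERDICT (by name: the statement is the Claim_ definition above) =====
theorem prioritize_documents_spec : Claim_equal_prioritize_documents := by
  intro docs intent _
  unfold Spec_prioritize_documents prioritize_documents prioritize_documents_alt
  rw [← pvKws_eq]
  set kws := pvDocKws intent with hkws
  by_cases hk : kws = []
  · simp [hk]
  · simp only [hk, if_false]
    set n := kws.length with hn
    -- A's side: stable reverse sort = concatenation of score groups, high score first
    rw [PySem.List.sorted_rev_eq_foldl_insertBy,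
        pvFoldl_insert_eq_buckets (fun d => pvScore kws d) n docs
          (fun d _ => pvScore_bounds kws d)]
    -- B's side: buckets, then concatenation of the reversed buckets
    rw [pvBuckets_eq (fun d => pvScoreB kws d) n docs
          (fun d _ => by
            have := (pvScore_bounds kws d).2
            rw [pvScore_eq] at this
            exact_mod_cast this)]
    rw [← List.map_reverse, pvRange_reverse]
    rw [PySem.List.foldl_append_eq_flatten, List.nil_append]
    rw [List.map_map]
    rw [show ∀ (l : List Nat) (f : Nat → List (List (String × String))),
          (l.map f).flatten = l.flatMap f from fun l f => by simp [List.flatMap_def]]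
    unfold pvDs
    rw [List.flatMap_map]
    apply pvFlatMap_congr
    intro k hk
    have hkn : k ≤ n := by have := List.mem_range.mp hk; omega
    simp only [Function.comp_apply]
    apply List.filter_congr
    intro d _
    rw [pvScore_eq]
    have : ((n : Int) - (k : Int)) = ((n - k : Nat) : Int) := by omega
    rw [this]
    simp
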